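-- pv_equiv track=rewrite | github.com/chenshixu/PTLVD | get_dataset/get_gadget.py | get_new_line_number
-- ===== SOURCE A (Python) =====
-- def get_new_line_number(raw_lines, all_lines, del_lines):  # 返回code gadget的行号和漏洞行号，若没有返回[]
--     # 得到新的行号
--     new_line = []
--     for line in all_lines:
--         if not line in del_lines:
--             new_line.append(line)
--
--     flag = False
--     # 判断是否存在漏洞
--     A = raw_lines
--     B = new_line
--     for a in A:
--         if a in B:
--             flag = True
--             break
--
--     line_number_list = []  #
--     if flag:  # 为漏洞
--         for i in range(len(new_line)):
--             if new_line[i] in raw_lines: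
--                 line_number_list.append(i + 1)
--
--     return new_line, line_number_list
-- ===== SOURCE B (Python) =====
-- def get_new_line_number(raw_lines, all_lines, del_lines):
--     new_line = []
--     line_number_list = []
--     for line in all_lines:
--         if line not in del_lines:
--             new_line.append(line)
--             if line in raw_lines:
--                 line_number_list.append(len(new_line))
--     return new_line, line_number_list
-- ===== Notes on version B (the rewrite author's own statement) =====
-- stated objective: simpler
-- what changed: One pass over all_lines builds both outputs at once (position = len(new_line) after appending), dropping A's separate existence scan and the index loop over range(len(new_line)); the collected list is empty exactly when A's flag is False.
import Mathlib
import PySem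

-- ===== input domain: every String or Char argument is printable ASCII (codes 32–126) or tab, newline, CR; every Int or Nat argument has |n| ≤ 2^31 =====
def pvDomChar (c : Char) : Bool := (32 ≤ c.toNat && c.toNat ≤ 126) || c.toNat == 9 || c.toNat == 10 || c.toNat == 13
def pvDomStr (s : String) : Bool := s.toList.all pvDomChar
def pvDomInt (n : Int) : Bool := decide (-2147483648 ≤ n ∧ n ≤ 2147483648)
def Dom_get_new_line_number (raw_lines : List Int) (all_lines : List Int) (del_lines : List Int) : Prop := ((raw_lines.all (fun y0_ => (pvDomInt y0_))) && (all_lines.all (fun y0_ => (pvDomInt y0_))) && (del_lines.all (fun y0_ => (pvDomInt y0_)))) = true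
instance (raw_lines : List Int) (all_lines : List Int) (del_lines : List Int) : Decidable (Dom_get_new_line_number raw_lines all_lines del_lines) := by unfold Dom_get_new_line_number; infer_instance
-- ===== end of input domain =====

-- B builds both outputs in one pass over all_lines (position = length of new_line after appending),
-- replacing A's three passes (filter, flag existence scan, index loop); objective: simpler.


-- ===== PORT A =====
-- `for i in range(len(new_line)): if new_line[i] in raw_lines: append(i+1)`
-- iterated from index i with n iterations remaining (append-collect written as list concatenation)
def aIdxLoop (new_line raw_lines : List Int) (i : Nat) : Nat → List Int
  | 0 => []
  | n + 1 =>
    (if new_line.getD i 0 ∈ raw_lines then [(i : Int) + 1] else []) ++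
      aIdxLoop new_line raw_lines (i + 1) n

def get_new_line_number (raw_lines : List Int) (all_lines : List Int) (del_lines : List Int) : List Int × List Int :=
  -- first loop: new_line
  let new_line := all_lines.foldl (fun acc line => if line ∈ del_lines then acc else acc ++ [line]) []
  -- second loop: existence scan with break
  let flag := raw_lines.any (fun a => a ∈ new_line)
  -- third loop: index scan, only if flag
  let line_number_list := if flag then aIdxLoop new_line raw_lines 0 new_line.length else []
  (new_line, line_number_list)

-- ===== PORT B =====
def get_new_line_number_alt (raw_lines : List Int) (all_lines : List Int) (del_lines : List Int) : List Int × List Int :=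
  all_lines.foldl
    (fun (st : List Int × List Int) line =>
      if line ∈ del_lines then st
      else
        let nl := st.1 ++ [line]
        (nl, if line ∈ raw_lines then st.2 ++ [(nl.length : Int)] else st.2))
    ([], [])

-- ===== PRECONDITION & SPEC =====
def Spec_get_new_line_number (raw_lines : List Int) (all_lines : List Int) (del_lines : List Int) (out : List Int × List Int) : Prop := out = get_new_line_number_alt raw_lines all_lines del_lines
instance (raw_lines : List Int) (all_lines : List Int) (del_lines : List Int) (out : List Int × List Int) : Decidable (Spec_get_new_line_number raw_lines all_lines del_lines out) := by unfold Spec_get_new_line_number; infer_instance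

-- ===== CLAIM (what is proved, stated in full; the proofs are below) =====
def Claim_equal_get_new_line_number : Prop := ∀ (raw_lines : List Int) (all_lines : List Int) (del_lines : List Int), Dom_get_new_line_number raw_lines all_lines del_lines → Spec_get_new_line_number raw_lines all_lines del_lines (get_new_line_number raw_lines all_lines del_lines)

-- ===== LEMMAS AND PROOFS =====

-- 1-based positions (offset by k) of the elements of a list that are members of raw
def posFrom (raw : List Int) (k : Int) : List Int → List Int
  | [] => []
  | x :: l => (if x ∈ raw then [k + 1] else []) ++ posFrom raw (k + 1) l

theorem aFilter_eq (del : List Int) :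
    ∀ (xs acc : List Int),
      xs.foldl (fun acc line => if line ∈ del then acc else acc ++ [line]) acc
        = acc ++ xs.filter (fun x => decide (x ∉ del)) := by
  intro xs
  induction xs with
  | nil => simp
  | cons x l ih =>
    intro acc
    by_cases h : x ∈ del <;> simp [List.foldl_cons, h, ih]

theorem posFrom_shift (raw : List Int) :
    ∀ (l : List Int) (k : Int),
      posFrom raw (k + 1) l = (posFrom raw k l).map (· + 1) := by
  intro l
  induction l with
  | nil => intro k; simp [posFrom]
  | cons x t ih =>
    intro k
    by_cases h : x ∈ raw <;> simp [posFrom, h, ih]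

theorem aIdxLoop_shift (raw : List Int) (x : Int) :
    ∀ (n : Nat) (l : List Int) (i : Nat),
      aIdxLoop (x :: l) raw (i + 1) n = (aIdxLoop l raw i n).map (· + 1) := by
  intro n
  induction n with
  | zero => intro l i; simp [aIdxLoop]
  | succ n ih =>
    intro l i
    simp only [aIdxLoop, List.getD_cons_succ, ih, List.map_append]
    split <;> simp

theorem aIdxLoop_eq (raw : List Int) :
    ∀ (f : List Int), aIdxLoop f raw 0 f.length = posFrom raw 0 f := by
  intro f
  induction f with
  | nil => simp [aIdxLoop, posFrom]
  | cons x l ih =>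
    have h1 : aIdxLoop (x :: l) raw (0 + 1) l.length = (aIdxLoop l raw 0 l.length).map (· + 1) :=
      aIdxLoop_shift raw x l.length l 0
    have h2 : posFrom raw (0 + 1) l = (posFrom raw 0 l).map (· + 1) := posFrom_shift raw l 0
    simp only [List.length_cons, aIdxLoop, List.getD_cons_zero, posFrom, h1, h2, ih]
    norm_num

theorem posFrom_nil_iff (raw : List Int) :
    ∀ (f : List Int) (k : Int), posFrom raw k f = [] ↔ ∀ x ∈ f, x ∉ raw := by
  intro f
  induction f with
  | nil => intro k; simp [posFrom]
  | cons x l ih =>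
    intro k
    by_cases h : x ∈ raw <;> simp [posFrom, h, ih]

theorem bFold (raw del : List Int) :
    ∀ (xs acc nums : List Int),
      xs.foldl
        (fun (st : List Int × List Int) line =>
          if line ∈ del then st
          else
            let nl := st.1 ++ [line]
            (nl, if line ∈ raw then st.2 ++ [(nl.length : Int)] else st.2))
        (acc, nums)
      = (acc ++ xs.filter (fun x => decide (x ∉ del)),
         nums ++ posFrom raw (acc.length : Int) (xs.filter (fun x => decide (x ∉ del)))) := by
  intro xs
  induction xs with
  | nil => simp [posFrom]
  | cons x l ih =>
    intro acc nums
    by_cases hd : x ∈ del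
    · have hpx : (decide (x ∉ del)) = false := by simp [hd]
      simp only [List.foldl_cons, List.filter_cons, hpx, Bool.false_eq_true,
        if_false, if_pos hd]
      exact ih acc nums
    · have hpx : (decide (x ∉ del)) = true := by simp [hd]
      simp only [List.foldl_cons, List.filter_cons, hpx, if_true, if_neg hd]
      rw [ih]
      have hlen : (((acc ++ [x]).length : Nat) : Int) = (acc.length : Int) + 1 := by
        simp
      refine Prod.ext (by simp) ?_
      by_cases hr : x ∈ raw <;>
        simp [posFrom, hr, List.append_assoc]

-- ===== VERDICT (by name: the statement is the Claim_ definition above) =====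
theorem get_new_line_number_spec : Claim_equal_get_new_line_number := by
  intro raw all del _
  unfold Spec_get_new_line_number get_new_line_number get_new_line_number_alt
  rw [bFold, aFilter_eq]
  simp only [List.nil_append, List.length_nil, Nat.cast_zero]
  set f := all.filter (fun x => decide (x ∉ del)) with hf
  rw [aIdxLoop_eq]
  split
  · rfl
  · rename_i hflag
    have h : ∀ x ∈ f, x ∉ raw := by
      intro x hx hxr
      exact hflag (by simp only [List.any_eq_true]; exact ⟨x, hxr, by simp [hx]⟩)
    rw [(posFrom_nil_iff raw f 0).mpr h]
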